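-- pv_equiv track=rewrite | github.com/FabioChiappina/RocketEvolution | file_manager.py | is_engine_code
-- ===== SOURCE A (Python) =====
-- def is_engine_code(engine_code):
--     if not isinstance(engine_code, str):
--         return False
--     if len(engine_code) != 5:
--         return False
--     engine_code = [c.lower() for c in engine_code]
--     if any([c not in ["-","b","p","g","u","d"] for c in engine_code]):
--         return False
--     return True
-- ===== SOURCE B (Python) =====
-- def is_engine_code(engine_code):
--     # Anchored pattern match: five repetitions of the class [-bpgud], consumed recursively.
--     if not isinstance(engine_code, str):
--         return False
--     s = engine_code.lower()
--     def match5(i, n):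
--         if n == 0:
--             return i == len(s)
--         return i < len(s) and s[i] in "-bpgud" and match5(i + 1, n - 1)
--     return match5(0, 5)
-- ===== Notes on version B (the rewrite author's own statement) =====
-- stated objective: alternative
-- what changed: Replaces A's length-check plus per-character lowercase-and-membership comprehension with a single anchored recursive matcher that lowercases the string once and consumes exactly five characters of the class -bpgud, checking end-of-string at the base case.
import Mathlib
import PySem

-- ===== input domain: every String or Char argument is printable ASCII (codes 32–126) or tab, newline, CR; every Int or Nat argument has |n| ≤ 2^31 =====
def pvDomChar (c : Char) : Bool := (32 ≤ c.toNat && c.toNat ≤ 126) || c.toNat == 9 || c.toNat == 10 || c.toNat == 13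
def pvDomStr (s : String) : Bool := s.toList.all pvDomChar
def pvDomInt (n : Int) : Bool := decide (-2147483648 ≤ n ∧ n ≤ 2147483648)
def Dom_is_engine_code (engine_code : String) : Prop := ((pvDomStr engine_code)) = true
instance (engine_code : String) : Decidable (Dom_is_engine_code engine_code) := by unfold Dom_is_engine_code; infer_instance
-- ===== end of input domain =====

-- B checks the format by one lowercasing pass and a recursive anchored match of five class characters,
-- instead of A's separate length test and per-character lowercase/membership comprehension (objective: alternative).

-- ===== PORT A =====
-- literal port of A: length guard, then the comprehension [c.lower() for c in engine_code]
-- (each c.lower() is a one-character string, ported as PySem.Chars.lower [c]), then any(not-in) over it.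
def is_engine_code (engine_code : String) : Bool :=
  if PySem.Str.len engine_code ≠ 5 then false
  else
    let ec : List (List Char) := engine_code.toList.map (fun c => PySem.Chars.lower [c])
    if ec.any (fun c => !([['-'],['b'],['p'],['g'],['u'],['d']].contains c)) then false else true

-- ===== PORT B =====
-- Source B's inner match5(i, n): s[i] is ported as getD with a dummy default because the
-- preceding `i < len(s)` conjunct (Python's short-circuit `and`) guarantees it is in range.
def pvMatch5 (s : List Char) (i : Nat) : Nat → Bool
  | 0 => decide (i = s.length)
  | Nat.succ m =>
      decide (i < s.length) && ("-bpgud".toList.contains (s.getD i ' ')) && pvMatch5 s (i+1) m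

def is_engine_code_alt (engine_code : String) : Bool :=
  pvMatch5 (PySem.Chars.lower engine_code.toList) 0 5

-- ===== PRECONDITION & SPEC =====
def Spec_is_engine_code (engine_code : String) (out : Bool) : Prop := out = is_engine_code_alt engine_code
instance (engine_code : String) (out : Bool) : Decidable (Spec_is_engine_code engine_code out) := by unfold Spec_is_engine_code; infer_instance

-- ===== CLAIM (what is proved, stated in full; the proofs are below) =====
def Claim_equal_is_engine_code : Prop := ∀ (engine_code : String), Dom_is_engine_code engine_code → Spec_is_engine_code engine_code (is_engine_code engine_code)

-- ===== LEMMAS AND PROOFS =====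

-- Both programs agree on every string: case on the first six characters; for length ≤ 5 both sides
-- reduce by simp to the same membership conjunctions, for length ≥ 6 both are false (omega on the length guard).
theorem is_engine_code_eq_alt (engine_code : String) :
    is_engine_code engine_code = is_engine_code_alt engine_code := by
  unfold is_engine_code is_engine_code_alt
  rcases h : engine_code.toList with _|⟨a,_|⟨b,_|⟨c,_|⟨d,_|⟨e,_|⟨f,t⟩⟩⟩⟩⟩⟩ <;>
    simp [PySem.Str.len, h, pvMatch5, PySem.Chars.lower]
  intro h2; omega

-- ===== VERDICT (by name: the statement is the Claim_ definition above) =====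
theorem is_engine_code_spec : Claim_equal_is_engine_code := by
  intro engine_code _
  unfold Spec_is_engine_code
  exact is_engine_code_eq_alt engine_code
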